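-- pv_equiv track=rewrite | github.com/Guancheng-Li/ToyHoldem | src/core/card/card_holdem_compare_util.py | _separate_high_low_factor
-- ===== SOURCE A (Python) =====
-- from typing import Dict, List, Tuple
--
-- def _separate_high_low_factor(group: Dict[int, int], target_count) -> Tuple[List[int], List[int]]:
--     high = []
--     low = []
--     for key, value in group.items():
--         if value == target_count:
--             high.append(key)
--         else:
--             low.append(key)
--     assert len(high) > 0
--     assert len(low) > 0
--     return sorted(high, reverse=True), sorted(low, reverse=True)
-- ===== SOURCE B (Python) =====
-- def _separate_high_low_factor(group, target_count):
--     # Incremental sorted insertion: each key is inserted at its place in an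
--     # already-descending destination list, so no sort call is needed at all.
--     high = []
--     low = []
--     for key, value in group.items():
--         dest = high if value == target_count else low
--         i = 0
--         while i < len(dest) and dest[i] > key:
--             i += 1
--         dest.insert(i, key)
--     assert len(high) > 0
--     assert len(low) > 0
--     return high, low
-- ===== Notes on version B (the rewrite author's own statement) =====
-- stated objective: alternative
-- what changed: B replaces partition-then-sort-each-part by incremental sorted insertion: each key is inserted at its correct position in an already-descending destination list in one pass, with no sort call at all.
import Mathlib
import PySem

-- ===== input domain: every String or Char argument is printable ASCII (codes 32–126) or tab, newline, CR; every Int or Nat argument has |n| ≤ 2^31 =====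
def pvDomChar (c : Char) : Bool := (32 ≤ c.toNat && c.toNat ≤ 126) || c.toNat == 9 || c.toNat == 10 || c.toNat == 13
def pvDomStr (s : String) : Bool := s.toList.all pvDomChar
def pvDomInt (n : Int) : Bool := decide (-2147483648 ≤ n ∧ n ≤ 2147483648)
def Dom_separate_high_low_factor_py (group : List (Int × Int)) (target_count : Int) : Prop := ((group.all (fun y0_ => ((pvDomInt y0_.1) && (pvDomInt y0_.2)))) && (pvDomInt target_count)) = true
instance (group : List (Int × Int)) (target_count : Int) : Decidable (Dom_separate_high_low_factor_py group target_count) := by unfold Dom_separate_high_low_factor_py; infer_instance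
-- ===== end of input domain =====

-- B replaces A's partition-then-sort-each-part by incremental sorted insertion (no sort call):
-- each key is placed at its position in an already-descending destination list in one pass.


-- ===== PORT A =====
-- for key, value in group.items(): append key to high if value == target_count else low;
-- then sort each part descending.  (The two asserts are reflected in Pre_ below.)
def separate_high_low_factor_py (group : List (Int × Int)) (target_count : Int) : List Int × List Int :=
  let hl := group.foldl
    (fun (hl : List Int × List Int) kv =>
      if kv.2 == target_count then (hl.1 ++ [kv.1], hl.2) else (hl.1, hl.2 ++ [kv.1]))
    ([], [])
  (PySem.List.sorted hl.1 (fun x => x) true, PySem.List.sorted hl.2 (fun x => x) true)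

-- ===== PORT B =====
-- the while-loop + dest.insert(i, key) of Source B: scan past the entries larger than key,
-- insert key there (keeps the list descending).
def pvInsDesc (k : Int) : List Int → List Int
  | [] => [k]
  | x :: xs => if x > k then x :: pvInsDesc k xs else k :: x :: xs

-- for key, value in group.items(): insert key into high or low at its sorted position.
def separate_high_low_factor_py_alt (group : List (Int × Int)) (target_count : Int) : List Int × List Int :=
  group.foldl
    (fun (hl : List Int × List Int) kv =>
      if kv.2 == target_count then (pvInsDesc kv.1 hl.1, hl.2) else (hl.1, pvInsDesc kv.1 hl.2))
    ([], [])

-- ===== PRECONDITION & SPEC =====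
-- Pre_ excludes association lists with duplicate keys (they cannot arise from a Python dict, which this
-- list represents) and inputs where every value, or no value, equals target_count — there A's asserts raise AssertionError.
def Pre_separate_high_low_factor_py (group : List (Int × Int)) (target_count : Int) : Prop :=
  (group.map Prod.fst).Nodup ∧ (∃ p ∈ group, p.2 = target_count) ∧ (∃ p ∈ group, p.2 ≠ target_count)
instance (group : List (Int × Int)) (target_count : Int) : Decidable (Pre_separate_high_low_factor_py group target_count) := by unfold Pre_separate_high_low_factor_py; infer_instance
def pvWitness_separate_high_low_factor_py : (List (Int × Int)) × Int := ([(1, 2), (3, 4)], 2)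

def Spec_separate_high_low_factor_py (group : List (Int × Int)) (target_count : Int) (out : List Int × List Int) : Prop := out = separate_high_low_factor_py_alt group target_count
instance (group : List (Int × Int)) (target_count : Int) (out : List Int × List Int) : Decidable (Spec_separate_high_low_factor_py group target_count out) := by unfold Spec_separate_high_low_factor_py; infer_instance

-- ===== CLAIM =====
def Claim_equal_separate_high_low_factor_py : Prop := ∀ (group : List (Int × Int)) (target_count : Int), Dom_separate_high_low_factor_py group target_count → Pre_separate_high_low_factor_py group target_count → Spec_separate_high_low_factor_py group target_count (separate_high_low_factor_py group target_count)

-- ===== LEMMAS AND PROOFS =====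

-- A's loop shape: a fold that appends the key to the first or second component.
theorem partition_foldl (p : Int × Int → Bool) :
    ∀ (g : List (Int × Int)) (h l : List Int),
      g.foldl (fun (hl : List Int × List Int) kv =>
          if p kv then (hl.1 ++ [kv.1], hl.2) else (hl.1, hl.2 ++ [kv.1])) (h, l)
        = (h ++ (g.filter p).map Prod.fst, l ++ (g.filter (fun x => !p x)).map Prod.fst) := by
  intro g
  induction g with
  | nil => simp
  | cons x xs ih =>
      intro h l
      by_cases hp : p x = true
      · simp [List.foldl, hp, ih]
      · simp only [Bool.not_eq_true] at hp
        simp [List.foldl, hp, ih]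

theorem insDesc_perm (k : Int) : ∀ l : List Int, (pvInsDesc k l).Perm (k :: l) := by
  intro l
  induction l with
  | nil => simp [pvInsDesc]
  | cons x xs ih =>
      by_cases hx : x > k
      · simpa [pvInsDesc, hx] using (ih.cons x).trans (List.Perm.swap k x xs)
      · simp [pvInsDesc, hx]

theorem mem_insDesc (k y : Int) (l : List Int) : y ∈ pvInsDesc k l ↔ y = k ∨ y ∈ l := by
  rw [(insDesc_perm k l).mem_iff]; simp

theorem insDesc_pairwise (k : Int) :
    ∀ l : List Int, l.Pairwise (fun a b => b < a) → k ∉ l →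
      (pvInsDesc k l).Pairwise (fun a b => b < a) := by
  intro l
  induction l with
  | nil => simp [pvInsDesc]
  | cons x xs ih =>
      intro hpw hk
      rw [List.pairwise_cons] at hpw
      by_cases hx : x > k
      · have : ∀ y ∈ pvInsDesc k xs, y < x := by
          intro y hy
          rcases (mem_insDesc k y xs).mp hy with rfl | hy'
          · exact hx
          · exact hpw.1 y hy'
        simpa [pvInsDesc, hx] using And.intro this (ih hpw.2 (fun h => hk (List.mem_cons_of_mem x h)))
      · have hkx : x < k := lt_of_le_of_ne (not_lt.mp hx) (fun h => hk (h ▸ List.mem_cons_self ..))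
        have : ∀ y ∈ x :: xs, y < k := by
          intro y hy
          rcases List.mem_cons.mp hy with rfl | hy'
          · exact hkx
          · exact lt_trans (hpw.1 y hy') hkx
        simp only [pvInsDesc, if_neg hx]
        exact List.pairwise_cons.mpr ⟨this, List.pairwise_cons.mpr hpw⟩

-- B's loop shape: the pair-fold splits into one insertion-fold per component.
theorem ins_foldl_split (p : Int × Int → Bool) :
    ∀ (g : List (Int × Int)) (h l : List Int),
      g.foldl (fun (hl : List Int × List Int) kv =>
          if p kv then (pvInsDesc kv.1 hl.1, hl.2) else (hl.1, pvInsDesc kv.1 hl.2)) (h, l)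
        = (((g.filter p).map Prod.fst).foldl (fun a k => pvInsDesc k a) h,
           ((g.filter (fun x => !p x)).map Prod.fst).foldl (fun a k => pvInsDesc k a) l) := by
  intro g
  induction g with
  | nil => simp
  | cons x xs ih =>
      intro h l
      by_cases hp : p x = true
      · simp [List.foldl, hp, ih]
      · simp only [Bool.not_eq_true] at hp
        simp [List.foldl, hp, ih]

theorem foldl_ins_perm : ∀ (l acc : List Int),
    (l.foldl (fun a k => pvInsDesc k a) acc).Perm (acc ++ l) := by
  intro l
  induction l with
  | nil => simp
  | cons k ks ih =>
      intro acc
      refine (ih (pvInsDesc k acc)).trans ?_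
      exact (((insDesc_perm k acc).append_right ks).trans List.perm_middle.symm)

theorem foldl_ins_pairwise : ∀ (l acc : List Int),
    acc.Pairwise (fun a b => b < a) → (∀ k ∈ l, k ∉ acc) → l.Nodup →
    (l.foldl (fun a k => pvInsDesc k a) acc).Pairwise (fun a b => b < a) := by
  intro l
  induction l with
  | nil => intro acc h _ _; simpa using h
  | cons k ks ih =>
      intro acc hpw hdisj hnd
      rw [List.nodup_cons] at hnd
      refine ih (pvInsDesc k acc) (insDesc_pairwise k acc hpw (hdisj k (List.mem_cons_self ..))) ?_ hnd.2
      intro k' hk' hmem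
      rcases (mem_insDesc k k' acc).mp hmem with rfl | h
      · exact hnd.1 hk'
      · exact hdisj k' (List.mem_cons_of_mem _ hk') h

-- Insertion-sort of a duplicate-free list IS Python's descending sort of it.
theorem foldl_ins_eq_sorted (l : List Int) (hnd : l.Nodup) :
    PySem.List.sorted l (fun x => x) true = l.foldl (fun a k => pvInsDesc k a) [] := by
  apply PySem.List.sorted_rev_eq_of_perm_of_pairwise_gt
  · simpa using foldl_ins_perm l []
  · exact foldl_ins_pairwise l [] (by simp) (by simp) hnd

-- ===== VERDICT =====
theorem separate_high_low_factor_py_spec : Claim_equal_separate_high_low_factor_py := by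
  intro group target_count _ hpre
  obtain ⟨hn, -, -⟩ := hpre
  unfold Spec_separate_high_low_factor_py separate_high_low_factor_py separate_high_low_factor_py_alt
  rw [partition_foldl (fun kv => kv.2 == target_count) group [] [],
      ins_foldl_split (fun kv => kv.2 == target_count) group [] []]
  simp only [List.nil_append]
  have hsub : ∀ q : Int × Int → Bool,
      ((group.filter q).map Prod.fst).Nodup := by
    intro q
    exact (List.Sublist.map Prod.fst (List.filter_sublist (l := group))).nodup hn
  exact Prod.ext (foldl_ins_eq_sorted _ (hsub _)) (foldl_ins_eq_sorted _ (hsub _))
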